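-- pv_equiv track=rewrite | github.com/RodrigoLazoKey/fundamentos-python | Tarea 11/10_3_2_juego_del_entorno.py | contar_unos_vecinos
-- ===== SOURCE A (Python) =====
-- def contar_unos_vecinos(matriz, n, m):
--     direcciones = [(-1,-1), (-1,0), (-1,1),
--                    (0,-1),         (0,1),
--                    (1,-1),  (1,0),  (1,1)]
--
--     resultado = []
--
--     for i in range(n):
--         fila_resultado = []
--         for j in range(m):
--             conteo = 0
--             for xd, dx in direcciones:
--                 no, si = i + xd, j + dx
--                 if 0 <= no < n and 0 <= si < m:
--                     if matriz[no][si] == 1: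
--                         conteo += 1
--             fila_resultado.append(conteo)
--         resultado.append(fila_resultado)
--
--     return resultado
-- ===== SOURCE B (Python) =====
-- def contar_unos_vecinos(matriz, n, m):
--     # Separable two-pass: indicator grid, horizontal triple sums, then
--     # vertical triple sums minus the center indicator.
--     ind = [[1 if matriz[i][j] == 1 else 0 for j in range(m)] for i in range(n)]
--     hs = [[(row[j - 1] if j > 0 else 0) + row[j] + (row[j + 1] if j + 1 < m else 0)
--            for j in range(m)] for row in ind]
--     return [[(hs[i - 1][j] if i > 0 else 0) + hs[i][j] + (hs[i + 1][j] if i + 1 < n else 0) - ind[i][j]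
--              for j in range(m)] for i in range(n)]
-- ===== Notes on version B (the rewrite author's own statement) =====
-- stated objective: alternative
-- what changed: Replaces the per-cell scan over the 8 direction offsets by a separable two-pass computation: one pass builds horizontal triple sums of the ==1 indicator per row, a second pass adds three vertical lookups of those row sums and subtracts the center indicator.
-- outside the precondition, e.g. on contar_unos_vecinos([[]], 1, 1): A returns [[0]], B raises IndexError
import Mathlib
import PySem

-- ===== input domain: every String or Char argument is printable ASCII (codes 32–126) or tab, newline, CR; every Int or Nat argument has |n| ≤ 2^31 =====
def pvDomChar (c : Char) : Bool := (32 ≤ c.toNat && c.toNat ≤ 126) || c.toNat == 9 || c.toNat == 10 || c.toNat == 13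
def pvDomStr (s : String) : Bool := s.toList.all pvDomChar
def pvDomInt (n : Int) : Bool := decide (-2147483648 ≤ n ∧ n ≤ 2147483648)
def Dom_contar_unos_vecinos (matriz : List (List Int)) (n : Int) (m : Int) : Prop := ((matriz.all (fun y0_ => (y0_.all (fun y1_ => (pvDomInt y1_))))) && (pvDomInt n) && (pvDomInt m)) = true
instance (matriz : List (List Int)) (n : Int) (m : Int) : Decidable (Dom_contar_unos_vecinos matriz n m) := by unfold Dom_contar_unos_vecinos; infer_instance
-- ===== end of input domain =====

-- B replaces A's 8-direction scan per cell by a separable two-pass computation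
-- (horizontal triple sums per row, then vertical triple sums minus the center
-- indicator); objective: alternative (same asymptotic cost, fewer lookups per cell).

-- ===== PORT A =====
def pvDirecciones : List (Int × Int) :=
  [(-1,-1), (-1,0), (-1,1), (0,-1), (0,1), (1,-1), (1,0), (1,1)]

-- literal transliteration of A; matriz[no][si] is read with pyGetD, exact
-- wherever the index is in range (guaranteed by the guard under Pre_).
def contar_unos_vecinos (matriz : List (List Int)) (n : Int) (m : Int) : List (List Int) :=
  (PySem.List.pyRange 0 n 1).foldl (fun resultado i =>
    resultado ++ [(PySem.List.pyRange 0 m 1).foldl (fun fila j =>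
      fila ++ [pvDirecciones.foldl (fun conteo d =>
        if 0 ≤ i + d.1 ∧ i + d.1 < n ∧ 0 ≤ j + d.2 ∧ j + d.2 < m then
          (if PySem.List.pyGetD (PySem.List.pyGetD matriz (i + d.1) []) (j + d.2) 0 = 1
           then conteo + 1 else conteo)
        else conteo) 0]) []]) []

-- ===== PORT B =====
-- literal transliteration of Source B (list comprehensions become maps; local-list
-- indexing row[j], hs[i] is pyGetD, exact wherever in range).
def contar_unos_vecinos_alt (matriz : List (List Int)) (n : Int) (m : Int) : List (List Int) :=
  let ind := (PySem.List.pyRange 0 n 1).map (fun i =>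
    (PySem.List.pyRange 0 m 1).map (fun j =>
      if PySem.List.pyGetD (PySem.List.pyGetD matriz i []) j 0 = 1 then (1 : Int) else 0))
  let hs := ind.map (fun row =>
    (PySem.List.pyRange 0 m 1).map (fun j =>
      (if 0 < j then PySem.List.pyGetD row (j - 1) 0 else 0) +
      PySem.List.pyGetD row j 0 +
      (if j + 1 < m then PySem.List.pyGetD row (j + 1) 0 else 0)))
  (PySem.List.pyRange 0 n 1).map (fun i =>
    (PySem.List.pyRange 0 m 1).map (fun j =>
      (if 0 < i then PySem.List.pyGetD (PySem.List.pyGetD hs (i - 1) []) j 0 else 0) +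
      PySem.List.pyGetD (PySem.List.pyGetD hs i []) j 0 +
      (if i + 1 < n then PySem.List.pyGetD (PySem.List.pyGetD hs (i + 1) []) j 0 else 0) -
      PySem.List.pyGetD (PySem.List.pyGetD ind i []) j 0))

-- ===== PRECONDITION & SPEC =====
-- Pre_ excludes the inputs on which A or B raises IndexError: when both n and m
-- are positive the matrix must really have n rows of length ≥ m.  On the
-- degenerate 1×1 grid A never reads the matrix and returns [[0]] even when the
-- cell is missing, while B (which reads every cell) raises; that accidental
-- corner is excluded here.
def Pre_contar_unos_vecinos (matriz : List (List Int)) (n : Int) (m : Int) : Prop :=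
  (0 < n ∧ 0 < m) →
    (n ≤ (matriz.length : Int) ∧ ∀ row ∈ matriz.take n.toNat, m ≤ (row.length : Int))
instance (matriz : List (List Int)) (n : Int) (m : Int) : Decidable (Pre_contar_unos_vecinos matriz n m) := by
  unfold Pre_contar_unos_vecinos; infer_instance

def pvWitness_contar_unos_vecinos : List (List Int) × Int × Int := ([[1, 0], [0, 1]], 2, 2)

def Spec_contar_unos_vecinos (matriz : List (List Int)) (n : Int) (m : Int) (out : List (List Int)) : Prop := out = contar_unos_vecinos_alt matriz n m
instance (matriz : List (List Int)) (n : Int) (m : Int) (out : List (List Int)) : Decidable (Spec_contar_unos_vecinos matriz n m out) := by unfold Spec_contar_unos_vecinos; infer_instance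

-- ===== CLAIM (what is proved, stated in full; the proofs are below) =====
def Claim_equal_contar_unos_vecinos : Prop := ∀ (matriz : List (List Int)) (n : Int) (m : Int), Dom_contar_unos_vecinos matriz n m → Pre_contar_unos_vecinos matriz n m → Spec_contar_unos_vecinos matriz n m (contar_unos_vecinos matriz n m)

-- ===== LEMMAS AND PROOFS =====

-- the ==1 indicator of a cell, as both ports read it
def pvInd (matriz : List (List Int)) (r c : Int) : Int :=
  if PySem.List.pyGetD (PySem.List.pyGetD matriz r []) c 0 = 1 then 1 else 0

lemma pv_foldl_append {α β : Type} (f : α → β) :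
    ∀ (l : List α) (acc : List β),
      l.foldl (fun acc x => acc ++ [f x]) acc = acc ++ l.map f := by
  intro l
  induction l with
  | nil => intro acc; simp
  | cons x xs ih => intro acc; simp [List.foldl, ih]

lemma pv_step_if (g : Prop) [Decidable g] (v c : Int) :
    (if g then (if v = 1 then c + 1 else c) else c)
      = c + (if g then (if v = 1 then (1 : Int) else 0) else 0) := by
  split_ifs <;> omega

lemma pv_if_iff {p q : Prop} [Decidable p] [Decidable q] (h : p ↔ q) (a b : Int) :
    (if p then a else b) = if q then a else b := by simp [h]

set_option maxHeartbeats 2000000 in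
-- the per-cell equality: A's 8-direction count equals B's separable formula
lemma pv_cell_eq (matriz : List (List Int)) (n m i j : Int)
    (hi0 : 0 ≤ i) (hin : i < n) (hj0 : 0 ≤ j) (hjm : j < m) :
    pvDirecciones.foldl (fun conteo d =>
      if 0 ≤ i + d.1 ∧ i + d.1 < n ∧ 0 ≤ j + d.2 ∧ j + d.2 < m then
        (if PySem.List.pyGetD (PySem.List.pyGetD matriz (i + d.1) []) (j + d.2) 0 = 1
         then conteo + 1 else conteo)
      else conteo) 0
    = (if 0 < i then
         (if 0 < j then pvInd matriz (i - 1) (j - 1) else 0) + pvInd matriz (i - 1) j +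
         (if j + 1 < m then pvInd matriz (i - 1) (j + 1) else 0) else 0) +
      ((if 0 < j then pvInd matriz i (j - 1) else 0) + pvInd matriz i j +
       (if j + 1 < m then pvInd matriz i (j + 1) else 0)) +
      (if i + 1 < n then
         (if 0 < j then pvInd matriz (i + 1) (j - 1) else 0) + pvInd matriz (i + 1) j +
         (if j + 1 < m then pvInd matriz (i + 1) (j + 1) else 0) else 0) -
      pvInd matriz i j := by
  have pvInd_def : ∀ r c : Int,
      (if PySem.List.pyGetD (PySem.List.pyGetD matriz r []) c 0 = 1 then (1 : Int) else 0)
        = pvInd matriz r c := fun _ _ => rfl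
  have e1 : i + -1 = i - 1 := by ring
  have e2 : j + -1 = j - 1 := by ring
  have e3 : i + 0 = i := by ring
  have e4 : j + 0 = j := by ring
  simp only [pvDirecciones, List.foldl, pv_step_if, e1, e2, e3, e4, pvInd_def]
  rw [pv_if_iff (show (0 ≤ i - 1 ∧ i - 1 < n ∧ 0 ≤ j - 1 ∧ j - 1 < m) ↔ (0 < i ∧ 0 < j) by omega),
      pv_if_iff (show (0 ≤ i - 1 ∧ i - 1 < n ∧ 0 ≤ j ∧ j < m) ↔ (0 < i) by omega),
      pv_if_iff (show (0 ≤ i - 1 ∧ i - 1 < n ∧ 0 ≤ j + 1 ∧ j + 1 < m) ↔ (0 < i ∧ j + 1 < m) by omega),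
      pv_if_iff (show (0 ≤ i ∧ i < n ∧ 0 ≤ j - 1 ∧ j - 1 < m) ↔ (0 < j) by omega),
      pv_if_iff (show (0 ≤ i ∧ i < n ∧ 0 ≤ j + 1 ∧ j + 1 < m) ↔ (j + 1 < m) by omega),
      pv_if_iff (show (0 ≤ i + 1 ∧ i + 1 < n ∧ 0 ≤ j - 1 ∧ j - 1 < m) ↔ (i + 1 < n ∧ 0 < j) by omega),
      pv_if_iff (show (0 ≤ i + 1 ∧ i + 1 < n ∧ 0 ≤ j ∧ j < m) ↔ (i + 1 < n) by omega),
      pv_if_iff (show (0 ≤ i + 1 ∧ i + 1 < n ∧ 0 ≤ j + 1 ∧ j + 1 < m) ↔ (i + 1 < n ∧ j + 1 < m) by omega)]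
  split_ifs <;> (try (exfalso; omega)) <;> ring

-- B's horizontal triple sum for row r at column j
def pvH (matriz : List (List Int)) (m r j : Int) : Int :=
  (if 0 < j then pvInd matriz r (j - 1) else 0) + pvInd matriz r j +
  (if j + 1 < m then pvInd matriz r (j + 1) else 0)

lemma pv_cell_eq' (matriz : List (List Int)) (n m i j : Int)
    (hi0 : 0 ≤ i) (hin : i < n) (hj0 : 0 ≤ j) (hjm : j < m) :
    pvDirecciones.foldl (fun conteo d =>
      if 0 ≤ i + d.1 ∧ i + d.1 < n ∧ 0 ≤ j + d.2 ∧ j + d.2 < m then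
        (if PySem.List.pyGetD (PySem.List.pyGetD matriz (i + d.1) []) (j + d.2) 0 = 1
         then conteo + 1 else conteo)
      else conteo) 0
    = (if 0 < i then pvH matriz m (i - 1) j else 0) + pvH matriz m i j +
      (if i + 1 < n then pvH matriz m (i + 1) j else 0) - pvInd matriz i j := by
  rw [pv_cell_eq matriz n m i j hi0 hin hj0 hjm]; rfl

-- evaluating B's lookup into the indicator grid
lemma pv_ind_get (matriz : List (List Int)) (n m i j : Int)
    (hi0 : 0 ≤ i) (hin : i < n) (hj0 : 0 ≤ j) (hjm : j < m) :
    PySem.List.pyGetD (PySem.List.pyGetD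
        ((PySem.List.pyRange 0 n 1).map (fun i =>
          (PySem.List.pyRange 0 m 1).map (fun j =>
            if PySem.List.pyGetD (PySem.List.pyGetD matriz i []) j 0 = 1 then (1 : Int) else 0))) i []) j 0
      = pvInd matriz i j := by
  rw [PySem.List.pyGetD_map_pyRange_of_nonneg _ _ _ _ hi0 hin,
      PySem.List.pyGetD_map_pyRange_of_nonneg _ _ _ _ hj0 hjm]
  rfl

-- evaluating B's lookup into the row-sum grid
lemma pv_hs_get (matriz : List (List Int)) (n m r j : Int)
    (hr0 : 0 ≤ r) (hrn : r < n) (hj0 : 0 ≤ j) (hjm : j < m) :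
    PySem.List.pyGetD (PySem.List.pyGetD
        (((PySem.List.pyRange 0 n 1).map (fun i =>
          (PySem.List.pyRange 0 m 1).map (fun j =>
            if PySem.List.pyGetD (PySem.List.pyGetD matriz i []) j 0 = 1 then (1 : Int) else 0))).map
          (fun row => (PySem.List.pyRange 0 m 1).map (fun j =>
            (if 0 < j then PySem.List.pyGetD row (j - 1) 0 else 0) +
            PySem.List.pyGetD row j 0 +
            (if j + 1 < m then PySem.List.pyGetD row (j + 1) 0 else 0)))) r []) j 0
      = pvH matriz m r j := by
  rw [List.map_map]
  rw [PySem.List.pyGetD_map_pyRange_of_nonneg _ _ _ _ hr0 hrn]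
  simp only [Function.comp_apply]
  rw [PySem.List.pyGetD_map_pyRange_of_nonneg _ _ _ _ hj0 hjm]
  unfold pvH
  by_cases h1 : 0 < j <;> by_cases h2 : j + 1 < m <;>
    simp only [h1, h2, if_true, if_false, ite_true, ite_false] <;>
    (first
      | (rw [PySem.List.pyGetD_map_pyRange_of_nonneg _ _ _ _ (by omega : (0:Int) ≤ j - 1) (by omega : j - 1 < m),
            PySem.List.pyGetD_map_pyRange_of_nonneg _ _ _ _ hj0 hjm,
            PySem.List.pyGetD_map_pyRange_of_nonneg _ _ _ _ (by omega : (0:Int) ≤ j + 1) h2])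
      | (rw [PySem.List.pyGetD_map_pyRange_of_nonneg _ _ _ _ (by omega : (0:Int) ≤ j - 1) (by omega : j - 1 < m),
            PySem.List.pyGetD_map_pyRange_of_nonneg _ _ _ _ hj0 hjm])
      | (rw [PySem.List.pyGetD_map_pyRange_of_nonneg _ _ _ _ hj0 hjm,
            PySem.List.pyGetD_map_pyRange_of_nonneg _ _ _ _ (by omega : (0:Int) ≤ j + 1) h2])
      | (rw [PySem.List.pyGetD_map_pyRange_of_nonneg _ _ _ _ hj0 hjm])) <;>
    simp only [pvInd]

-- ===== VERDICT (by name: the statement is the Claim_ definition above) =====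
theorem contar_unos_vecinos_spec : Claim_equal_contar_unos_vecinos := by
  intro matriz n m _ _
  unfold Spec_contar_unos_vecinos contar_unos_vecinos contar_unos_vecinos_alt
  simp only [pv_foldl_append, List.nil_append]
  refine List.map_congr_left ?_
  intro i hi
  obtain ⟨hi0, hin⟩ := PySem.List.mem_pyRange_one.mp hi
  refine List.map_congr_left ?_
  intro j hj
  obtain ⟨hj0, hjm⟩ := PySem.List.mem_pyRange_one.mp hj
  rw [pv_cell_eq' matriz n m i j hi0 hin hj0 hjm,
      pv_ind_get matriz n m i j hi0 hin hj0 hjm,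
      pv_hs_get matriz n m i j hi0 hin hj0 hjm]
  by_cases hI : 0 < i <;> by_cases hN : i + 1 < n <;>
    simp only [hI, hN, if_true, if_false] <;>
    first
      | (rw [pv_hs_get matriz n m (i - 1) j (by omega) (by omega) hj0 hjm,
            pv_hs_get matriz n m (i + 1) j (by omega) hN hj0 hjm])
      | (rw [pv_hs_get matriz n m (i - 1) j (by omega) (by omega) hj0 hjm])
      | (rw [pv_hs_get matriz n m (i + 1) j (by omega) hN hj0 hjm])
      | skip
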